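-- pv_equiv track=rewrite | github.com/taromukhalela-alt/Vector-AI | model/generator.py | _sanitize_generated_reply
-- ===== SOURCE A (Python) =====
-- def _sanitize_generated_reply(reply):
--     if not reply:
--         return reply
--     cleaned = reply.strip()
--     for marker in ["User:", "Assistant:", "Intent hint:"]:
--         if marker in cleaned:
--             cleaned = cleaned.split(marker)[0].strip()
--     return cleaned
-- ===== SOURCE B (Python) =====
-- def _sanitize_generated_reply(reply):
--     if not reply:
--         return reply
--     cleaned = reply.strip()
--     cut = len(cleaned)
--     for marker in ["User:", "Assistant:", "Intent hint:"]:
--         idx = cleaned.find(marker)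
--         if idx != -1 and idx < cut:
--             cut = idx
--     return cleaned[:cut].strip()
-- ===== Notes on version B (the rewrite author's own statement) =====
-- stated objective: simpler
-- what changed: Instead of repeatedly splitting the working string at each marker and re-stripping it, B computes the minimum first-occurrence index of the three markers with one find each and returns a single slice-then-strip of the cleaned string.
import Mathlib
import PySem

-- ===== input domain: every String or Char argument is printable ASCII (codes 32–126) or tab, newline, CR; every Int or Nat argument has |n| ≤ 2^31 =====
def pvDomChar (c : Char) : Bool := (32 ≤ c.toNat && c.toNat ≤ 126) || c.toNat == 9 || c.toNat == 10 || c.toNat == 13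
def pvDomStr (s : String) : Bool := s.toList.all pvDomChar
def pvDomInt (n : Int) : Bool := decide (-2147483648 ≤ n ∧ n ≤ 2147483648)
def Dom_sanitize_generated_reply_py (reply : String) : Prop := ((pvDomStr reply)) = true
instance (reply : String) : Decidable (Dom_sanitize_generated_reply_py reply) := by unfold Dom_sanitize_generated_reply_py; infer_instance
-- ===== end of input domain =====

-- B finds the earliest cut position over all markers (one find per marker, then a single
-- slice+strip) instead of A's repeated split-and-strip of the working string (objective: simpler).

-- the conversation role markers, shared verbatim by both programs
def pyMarkers : List String := ["User:", "Assistant:", "Intent hint:"]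

-- ===== PORT A =====
-- one iteration of A's loop: if marker in cleaned: cleaned = cleaned.split(marker)[0].strip()
-- (markers are non-empty so `split?` is `some`; `[0]` is pyGet? 0 — split returns ≥ 1 piece)
def pyA_step (cleaned marker : String) : String :=
  if PySem.Str.isIn marker cleaned then
    PySem.Str.strip ((PySem.List.pyGet? ((PySem.Str.split? cleaned marker).getD []) 0).getD "")
  else cleaned

def sanitize_generated_reply_py (reply : String) : String :=
  if reply = "" then reply
  else pyMarkers.foldl pyA_step (PySem.Str.strip reply)

-- ===== PORT B =====
-- one iteration of B's loop: idx = cleaned.find(marker); if idx != -1 and idx < cut: cut = idx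
def pyB_cut (cleaned : String) (cut : Int) (marker : String) : Int :=
  let idx := PySem.Str.find cleaned marker
  if idx ≠ -1 ∧ idx < cut then idx else cut

def sanitize_generated_reply_py_alt (reply : String) : String :=
  if reply = "" then reply
  else
    let cleaned := PySem.Str.strip reply
    let cut := pyMarkers.foldl (pyB_cut cleaned) (PySem.Str.len cleaned)
    PySem.Str.strip (PySem.Str.slice cleaned none (some cut))

-- ===== PRECONDITION & SPEC =====
def Spec_sanitize_generated_reply_py (reply : String) (out : String) : Prop := out = sanitize_generated_reply_py_alt reply
instance (reply : String) (out : String) : Decidable (Spec_sanitize_generated_reply_py reply out) := by unfold Spec_sanitize_generated_reply_py; infer_instance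

-- ===== CLAIM (what is proved, stated in full; the proofs are below) =====
def Claim_equal_sanitize_generated_reply_py : Prop := ∀ (reply : String), Dom_sanitize_generated_reply_py reply → Spec_sanitize_generated_reply_py reply (sanitize_generated_reply_py reply)

-- ===== LEMMAS AND PROOFS =====

theorem pv_getLastD_eq_getElem (l : List Char) (h : l ≠ []) (d : Char) :
    l.getLastD d = l[l.length - 1]'(by cases l with | nil => exact absurd rfl h | cons a t => simp) := by
  rw [List.getLastD_eq_getLast?, List.getLast?_eq_getElem?]
  simp [List.getElem?_eq_getElem (l := l) (i := l.length - 1) (by cases l with | nil => exact absurd rfl h | cons a t => simp)]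

theorem pv_dropWhile_take (p : Char → Bool) (s : List Char) (hs : s.dropWhile p = s) (c : Nat) :
    (s.take c).dropWhile p = s.take c := by
  cases s with
  | nil => simp
  | cons a t =>
    cases c with
    | zero => simp
    | succ n =>
      have ha : p a = false := by
        by_contra hpa
        simp [eq_true_of_ne_false hpa] at hs
        have := congrArg List.length hs; simp at this
        have := List.length_dropWhile_le p t; omega
      simp [List.take_succ_cons, ha]

theorem pv_strip_of_lstripped (s : List Char) (hs : s.dropWhile PySem.Chars.isspace = s) :
    PySem.Chars.strip s = PySem.Chars.rstrip s := by
  unfold PySem.Chars.strip PySem.Chars.lstrip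
  rw [hs]

theorem pv_rstrip_prefix (s : List Char) : PySem.Chars.rstrip s <+: s := by
  unfold PySem.Chars.rstrip
  have := (List.dropWhile_suffix (l := s.reverse) PySem.Chars.isspace).reverse
  simpa using this

theorem pv_rstrip_eq_take (s : List Char) :
    PySem.Chars.rstrip s = s.take (PySem.Chars.rstrip s).length :=
  List.prefix_iff_eq_take.mp (pv_rstrip_prefix s)

theorem pv_rstrip_dropped_ws (s : List Char) (i : Nat) (hr : (PySem.Chars.rstrip s).length ≤ i)
    (hi : i < s.length) : PySem.Chars.isspace s[i] = true := by
  have hdec : s = PySem.Chars.rstrip s ++ (s.reverse.takeWhile PySem.Chars.isspace).reverse := by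
    unfold PySem.Chars.rstrip
    have := List.takeWhile_append_dropWhile (p := PySem.Chars.isspace) (l := s.reverse)
    calc s = s.reverse.reverse := by simp
    _ = (s.reverse.takeWhile PySem.Chars.isspace ++ s.reverse.dropWhile PySem.Chars.isspace).reverse := by rw [this]
    _ = _ := by rw [List.reverse_append]
  have hlen : i < (PySem.Chars.rstrip s ++ (s.reverse.takeWhile PySem.Chars.isspace).reverse).length := by
    rw [← hdec]; exact hi
  have hmem : s[i] ∈ (s.reverse.takeWhile PySem.Chars.isspace).reverse := by
    have h2 := List.getElem_of_eq hdec hi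
    rw [h2, List.getElem_append_right (by omega)]
    apply List.getElem_mem
  exact List.mem_takeWhile_imp (List.mem_reverse.mp hmem)

theorem pv_lstrip_strip (s : List Char) :
    (PySem.Chars.strip s).dropWhile PySem.Chars.isspace = PySem.Chars.strip s := by
  unfold PySem.Chars.strip
  rw [pv_rstrip_eq_take (PySem.Chars.lstrip s)]
  exact pv_dropWhile_take _ _ (List.dropWhile_idempotent _ _) _

theorem pv_rstrip_strip (s : List Char) :
    PySem.Chars.rstrip (PySem.Chars.strip s) = PySem.Chars.strip s := by
  unfold PySem.Chars.strip PySem.Chars.rstrip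
  simp [List.dropWhile_idempotent]

theorem pv_occ_take_iff (m u : List Char) (c j : Nat) :
    m <+: (u.take c).drop j ↔ m <+: u.drop j ∧ m.length ≤ c - j := by
  rw [List.drop_take, List.prefix_take_iff]

theorem pv_marker_facts : ∀ m ∈ pyMarkers, m.toList ≠ [] ∧
    PySem.Chars.isspace (m.toList.getLastD 'x') = false := by decide

theorem pv_marker_overlap : ∀ m2 ∈ pyMarkers, ∀ m ∈ pyMarkers, ∀ d : Nat, d < m2.toList.length → d ≠ 0 →
    ¬(m2.toList.drop d <+: m.toList) ∧ ¬(m.toList <+: m2.toList.drop d) := by decide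

def PvCutok (s : List Char) (c : Nat) : Prop :=
  c ≤ s.length ∧ ∀ m ∈ pyMarkers, ∀ j : Nat, m.toList <+: s.drop j → j < c → j + m.toList.length ≤ c

theorem pv_occ_rstrip_iff (m u : List Char) (hm : m ≠ [])
    (_hlast : PySem.Chars.isspace (m.getLastD 'x') = false) (j : Nat) :
    m <+: (PySem.Chars.rstrip u).drop j ↔ m <+: u.drop j ∧ j + m.length ≤ (PySem.Chars.rstrip u).length := by
  have hmlen : 0 < m.length := List.length_pos_iff.mpr hm
  constructor
  · intro h
    rw [pv_rstrip_eq_take u, pv_occ_take_iff] at h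
    have hrle : (PySem.Chars.rstrip u).length ≤ u.length := (pv_rstrip_prefix u).length_le
    exact ⟨h.1, by omega⟩
  · rintro ⟨h, hfit⟩
    rw [pv_rstrip_eq_take u, pv_occ_take_iff]
    exact ⟨h, by omega⟩

theorem pv_occ_rstrip_of_occ (m u : List Char) (hm : m ≠ [])
    (hlast : PySem.Chars.isspace (m.getLastD 'x') = false) (j : Nat) (h : m <+: u.drop j) :
    j + m.length ≤ (PySem.Chars.rstrip u).length := by
  have hmlen : 0 < m.length := List.length_pos_iff.mpr hm
  have hdlen : m.length ≤ (u.drop j).length := h.length_le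
  rw [List.length_drop] at hdlen
  by_contra hgt
  -- the last character of m sits at u[j + m.length - 1], inside the stripped whitespace
  have hidx : j + (m.length - 1) < u.length := by omega
  have hws : PySem.Chars.isspace (u[j + (m.length - 1)]'hidx) = true :=
    pv_rstrip_dropped_ws u _ (by omega) hidx
  have hlast' : m.getLastD 'x' = m[m.length - 1]'(by omega) := pv_getLastD_eq_getElem m hm 'x'
  have hpe : m[m.length - 1]'(by omega) = (u.drop j)[m.length - 1]'(by rw [List.length_drop]; omega) :=
    h.getElem (by omega)
  rw [List.getElem_drop] at hpe
  rw [hlast', hpe, hws] at hlast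
  exact absurd hlast (by simp)

theorem pv_occ_state_iff (s : List Char) (c : Nat) (m : String) (hm : m ∈ pyMarkers)
    (hcut : PvCutok s c) (j : Nat) :
    m.toList <+: (PySem.Chars.rstrip (s.take c)).drop j ↔ m.toList <+: s.drop j ∧ j < c := by
  obtain ⟨hne, hlast⟩ := pv_marker_facts m hm
  have hmlen : 0 < m.toList.length := List.length_pos_iff.mpr hne
  obtain ⟨hcle, hstr⟩ := hcut
  constructor
  · intro h
    rw [pv_occ_rstrip_iff _ _ hne hlast] at h
    obtain ⟨h1, h2⟩ := h
    rw [pv_occ_take_iff] at h1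
    have hrle : (PySem.Chars.rstrip (s.take c)).length ≤ (s.take c).length := (pv_rstrip_prefix _).length_le
    rw [List.length_take] at hrle
    exact ⟨h1.1, by omega⟩
  · rintro ⟨h, hj⟩
    have hfit : j + m.toList.length ≤ c := hstr m hm j h hj
    have hocc : m.toList <+: (s.take c).drop j := by
      rw [pv_occ_take_iff]; exact ⟨h, by omega⟩
    rw [pv_occ_rstrip_iff _ _ hne hlast]
    exact ⟨hocc, pv_occ_rstrip_of_occ _ _ hne hlast j hocc⟩

theorem pv_find_state (s : List Char) (c : Nat) (m : String) (hm : m ∈ pyMarkers)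
    (hcut : PvCutok s c) :
    PySem.Chars.find (PySem.Chars.rstrip (s.take c)) m.toList =
      if 0 ≤ PySem.Chars.find s m.toList ∧ PySem.Chars.find s m.toList < (c : Int)
      then PySem.Chars.find s m.toList else -1 := by
  set t := PySem.Chars.rstrip (s.take c) with ht
  have hocc := pv_occ_state_iff s c m hm hcut
  by_cases hf' : 0 ≤ PySem.Chars.find t m.toList
  · obtain ⟨hp', hmin'⟩ := PySem.Chars.find_spec hf'
    have hoccS : m.toList <+: s.drop (PySem.Chars.find t m.toList).toNat ∧ (PySem.Chars.find t m.toList).toNat < c :=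
      (hocc _).mp hp'
    have hfS : 0 ≤ PySem.Chars.find s m.toList := by
      rw [PySem.Chars.find_nonneg_iff, ← PySem.Chars.isIn_iff_infix, ← PySem.Chars.exists_prefix_drop_iff_isIn]
      exact ⟨_, hoccS.1⟩
    obtain ⟨hpS, hminS⟩ := PySem.Chars.find_spec hfS
    have hle : (PySem.Chars.find s m.toList).toNat ≤ (PySem.Chars.find t m.toList).toNat := by
      by_contra hgt
      exact hminS _ (by omega) hoccS.1
    have heq : (PySem.Chars.find s m.toList).toNat = (PySem.Chars.find t m.toList).toNat := by
      by_contra hne2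
      have hltc : (PySem.Chars.find s m.toList).toNat < c := by omega
      have : m.toList <+: t.drop (PySem.Chars.find s m.toList).toNat := (hocc _).mpr ⟨hpS, hltc⟩
      exact hmin' _ (by omega) this
    have heqI : PySem.Chars.find s m.toList = PySem.Chars.find t m.toList := by omega
    rw [if_pos ⟨hfS, by omega⟩, heqI]
  · have hf1 : PySem.Chars.find t m.toList = -1 := by
      have := PySem.Chars.neg_one_le_find t m.toList; omega
    rw [hf1]
    by_cases hcond : 0 ≤ PySem.Chars.find s m.toList ∧ PySem.Chars.find s m.toList < (c : Int)
    · exfalso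
      obtain ⟨hpS, _⟩ := PySem.Chars.find_spec hcond.1
      have : m.toList <+: t.drop (PySem.Chars.find s m.toList).toNat :=
        (hocc _).mpr ⟨hpS, by omega⟩
      have hinf : m.toList <:+: t := by
        rw [← PySem.Chars.isIn_iff_infix, ← PySem.Chars.exists_prefix_drop_iff_isIn]
        exact ⟨_, this⟩
      rw [← PySem.Chars.find_nonneg_iff] at hinf
      exact hf' hinf
    · rw [if_neg hcond]

theorem pv_cutok_update (s : List Char) (c : Nat) (m : String) (hm : m ∈ pyMarkers)
    (hcut : PvCutok s c) (hf : 0 ≤ PySem.Chars.find s m.toList)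
    (hlt : PySem.Chars.find s m.toList < (c : Int)) :
    PvCutok s (PySem.Chars.find s m.toList).toNat := by
  obtain ⟨hpS, hminS⟩ := PySem.Chars.find_spec hf
  set f := (PySem.Chars.find s m.toList).toNat with hfdef
  obtain ⟨hcle, _⟩ := hcut
  refine ⟨by omega, ?_⟩
  intro m2 hm2 j hocc hj
  by_contra hstraddle
  -- m2 occurs at j < f, extends past f; m occurs at f: the two overlap with offset d
  set d := f - j with hd
  have hd1 : d ≠ 0 := by omega
  have hdlen : d < m2.toList.length := by omega
  -- drop d m2 and m are both prefixes of s.drop f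
  have h1 : m2.toList.drop d <+: s.drop f := by
    obtain ⟨tl, htl⟩ := hocc
    have : (s.drop j).drop d = s.drop f := by rw [List.drop_drop]; congr 1; omega
    rw [← this, ← htl, List.drop_append_of_le_length (by omega)]
    exact ⟨tl, rfl⟩
  have h2 : m.toList <+: s.drop f := hpS
  rcases List.prefix_or_prefix_of_prefix h1 h2 with h | h
  · exact (pv_marker_overlap m2 hm2 m hm d hdlen hd1).1 h
  · exact (pv_marker_overlap m2 hm2 m hm d hdlen hd1).2 h
theorem pv_splitOn_go_acc (sep : List Char) : ∀ (fuel : Nat) (l cur : List Char) (acc : List (List Char)),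
    ∃ x, PySem.Chars.splitOn.go sep fuel l cur acc = acc.reverse ++ x ∧ x ≠ [] := by
  intro fuel
  induction fuel with
  | zero =>
    intro l cur acc
    exact ⟨[cur.reverse ++ l], by simp [PySem.Chars.splitOn.go], by simp⟩
  | succ f ih =>
    intro l cur acc
    cases l with
    | nil => exact ⟨[cur.reverse], by simp [PySem.Chars.splitOn.go], by simp⟩
    | cons c rest =>
      by_cases hp : sep.isPrefixOf (c :: rest)
      · obtain ⟨x, hx, hxne⟩ := ih (List.drop sep.length (c :: rest)) [] (cur.reverse :: acc)
        refine ⟨cur.reverse :: x, ?_, by simp⟩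
        rw [PySem.Chars.splitOn.go]
        simp only [hp, if_true]
        rw [hx]; simp
      · obtain ⟨x, hx, hxne⟩ := ih rest (c :: cur) acc
        refine ⟨x, ?_, hxne⟩
        rw [PySem.Chars.splitOn.go]
        simp only [hp, if_false, Bool.false_eq_true]
        exact hx

theorem pv_splitOn_go_head (sep : List Char) (hsep : sep ≠ []) :
    ∀ (fuel : Nat) (l cur : List Char) (k : Nat), l.length < fuel → sep <+: l.drop k →
    (∀ i < k, ¬ sep <+: l.drop i) →
    ∃ rest, PySem.Chars.splitOn.go sep fuel l cur [] = (cur.reverse ++ l.take k) :: rest := by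
  intro fuel
  induction fuel with
  | zero => intro l cur k hfuel; omega
  | succ f ih =>
    intro l cur k hfuel hk hmin
    cases l with
    | nil =>
      exfalso
      have : sep <+: ([] : List Char) := by simpa using hk
      exact hsep (List.prefix_nil.mp this)
    | cons c rest =>
      cases k with
      | zero =>
        have hp : sep.isPrefixOf (c :: rest) = true := by
          rw [List.isPrefixOf_iff_prefix]; simpa using hk
        obtain ⟨x, hx, _⟩ := pv_splitOn_go_acc sep f (List.drop sep.length (c :: rest)) [] [cur.reverse]
        refine ⟨x, ?_⟩
        rw [PySem.Chars.splitOn.go]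
        simp only [hp, if_true]
        rw [hx]; simp
      | succ k' =>
        have hp : sep.isPrefixOf (c :: rest) = false := by
          rw [Bool.eq_false_iff]
          intro h
          exact hmin 0 (by omega) (by rw [List.isPrefixOf_iff_prefix] at h; simpa using h)
        have hk' : sep <+: rest.drop k' := by simpa using hk
        have hmin' : ∀ i < k', ¬ sep <+: rest.drop i := by
          intro i hi h
          exact hmin (i+1) (by omega) (by simpa using h)
        obtain ⟨x, hx⟩ := ih rest (c :: cur) k' (by simp at hfuel ⊢; omega) hk' hmin'
        refine ⟨x, ?_⟩
        rw [PySem.Chars.splitOn.go]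
        simp only [hp, if_false, Bool.false_eq_true]
        rw [hx]
        simp [List.take_succ_cons]

theorem pv_splitOn_head (t sep : List Char) (hsep : sep ≠ []) (hf : 0 ≤ PySem.Chars.find t sep) :
    ∃ rest, PySem.Chars.splitOn t sep = t.take (PySem.Chars.find t sep).toNat :: rest := by
  obtain ⟨hp, hmin⟩ := PySem.Chars.find_spec hf
  obtain ⟨rest, hrest⟩ := pv_splitOn_go_head sep hsep (t.length + 1) t [] (PySem.Chars.find t sep).toNat
    (by omega) hp hmin
  exact ⟨rest, by rw [PySem.Chars.splitOn, hrest]; simp⟩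

theorem pv_step (s : List Char) (hs : s.dropWhile PySem.Chars.isspace = s) (c : Nat)
    (hcut : PvCutok s c) (m : String) (hm : m ∈ pyMarkers) (st : String)
    (hst : st.toList = PySem.Chars.rstrip (s.take c)) :
    ∃ c' : Nat, PvCutok s c' ∧
      (pyA_step st m).toList = PySem.Chars.rstrip (s.take c') ∧
      pyB_cut (String.ofList s) (c : Int) m = (c' : Int) := by
  obtain ⟨hne, hlast⟩ := pv_marker_facts m hm
  have hmlen : 0 < m.toList.length := List.length_pos_iff.mpr hne
  set t := PySem.Chars.rstrip (s.take c) with ht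
  have hfind := pv_find_state s c m hm hcut
  rw [← ht] at hfind
  have hBfind : PySem.Str.find (String.ofList s) m = PySem.Chars.find s m.toList := by
    unfold PySem.Str.find; rw [String.toList_ofList]
  by_cases hcond : 0 ≤ PySem.Chars.find s m.toList ∧ PySem.Chars.find s m.toList < (c : Int)
  · -- marker found before the cut
    set f := PySem.Chars.find s m.toList with hfdef
    refine ⟨f.toNat, pv_cutok_update s c m hm hcut hcond.1 hcond.2, ?_, ?_⟩
    · -- A side
      rw [if_pos hcond] at hfind
      have hisin : PySem.Str.isIn m st = true := by
        unfold PySem.Str.isIn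
        rw [hst, PySem.Chars.isIn_iff_infix, ← PySem.Chars.find_nonneg_iff, hfind]
        exact hcond.1
      have hsplit : PySem.Str.split? st m =
          some ((PySem.Chars.splitOn t m.toList).map String.ofList) := by
        unfold PySem.Str.split? PySem.Chars.split?
        rw [hst]
        simp [List.isEmpty_iff, hne]
      obtain ⟨rest, hhead⟩ := pv_splitOn_head t m.toList hne (by rw [hfind]; exact hcond.1)
      rw [hfind] at hhead
      -- t.take f.toNat = s.take f.toNat
      have hocc_t : m.toList <+: t.drop f.toNat := by
        have h0 : 0 ≤ PySem.Chars.find t m.toList := by rw [hfind]; exact hcond.1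
        have := (PySem.Chars.find_spec h0).1
        rw [hfind] at this; exact this
      have hfit : f.toNat + m.toList.length ≤ t.length := by
        have := hocc_t.length_le
        rw [List.length_drop] at this
        omega
      have htlen : t.length ≤ c := by
        have h1 : t.length ≤ (s.take c).length := (pv_rstrip_prefix _).length_le
        rw [List.length_take] at h1; omega
      have htake : t.take f.toNat = s.take f.toNat := by
        rw [ht, pv_rstrip_eq_take (s.take c), ← ht, List.take_take, List.take_take]
        congr 1
        omega
      rw [pyA_step, hisin, if_pos rfl, hsplit]
      have hget : PySem.List.pyGet? ((PySem.Chars.splitOn t m.toList).map String.ofList) 0 =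
          some (String.ofList (t.take f.toNat)) := by
        rw [hhead]; simp [PySem.List.pyGet?, PySem.List.pyIdx?]
      rw [Option.getD_some, hget, Option.getD_some]
      unfold PySem.Str.strip
      rw [String.toList_ofList, String.toList_ofList, htake,
        pv_strip_of_lstripped _ (pv_dropWhile_take _ _ hs _)]
    · -- B side
      rw [pyB_cut, hBfind]
      rw [if_pos ⟨by omega, hcond.2⟩]
      omega
  · -- marker not found before the cut: both sides unchanged
    rw [if_neg hcond] at hfind
    refine ⟨c, hcut, ?_, ?_⟩
    · have hisin : PySem.Str.isIn m st = false := by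
        unfold PySem.Str.isIn
        rw [hst, Bool.eq_false_iff]
        intro h
        rw [PySem.Chars.isIn_iff_infix, ← PySem.Chars.find_nonneg_iff, hfind] at h
        omega
      rw [pyA_step, hisin]
      simp only [Bool.false_eq_true, if_false]
      rw [hst, ht]
    · rw [pyB_cut, hBfind]
      have hge := PySem.Chars.neg_one_le_find s m.toList
      rw [if_neg (by intro h; exact hcond ⟨by omega, h.2⟩)]

theorem pv_loop (s : List Char) (hs : s.dropWhile PySem.Chars.isspace = s) (L : List String)
    (hL : ∀ m ∈ L, m ∈ pyMarkers) : ∀ (c : Nat), PvCutok s c → ∀ (st : String),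
    st.toList = PySem.Chars.rstrip (s.take c) →
    ∃ c' : Nat, PvCutok s c' ∧
      (L.foldl pyA_step st).toList = PySem.Chars.rstrip (s.take c') ∧
      L.foldl (pyB_cut (String.ofList s)) (c : Int) = (c' : Int) := by
  induction L with
  | nil => intro c hcut st hst; exact ⟨c, hcut, by simpa using hst, by simp⟩
  | cons m L ih =>
    intro c hcut st hst
    obtain ⟨c1, hcut1, hA1, hB1⟩ := pv_step s hs c hcut m (hL m (by simp)) st hst
    obtain ⟨c', hcut', hA', hB'⟩ := ih (fun x hx => hL x (by simp [hx])) c1 hcut1 _ hA1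
    exact ⟨c', hcut', by simpa using hA', by simp [hB1, hB']⟩

theorem pv_main (reply : String) :
    sanitize_generated_reply_py reply = sanitize_generated_reply_py_alt reply := by
  by_cases hr : reply = ""
  · simp [sanitize_generated_reply_py, sanitize_generated_reply_py_alt, hr]
  · rw [sanitize_generated_reply_py, sanitize_generated_reply_py_alt, if_neg hr, if_neg hr]
    set cl := PySem.Str.strip reply with hcldef
    have hcl : cl.toList = PySem.Chars.strip reply.toList := by
      rw [hcldef]; unfold PySem.Str.strip; rw [String.toList_ofList]
    set s := PySem.Chars.strip reply.toList with hsdef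
    have hs : s.dropWhile PySem.Chars.isspace = s := pv_lstrip_strip reply.toList
    have hrs : PySem.Chars.rstrip s = s := pv_rstrip_strip reply.toList
    have hcut0 : PvCutok s s.length := by
      refine ⟨le_refl _, fun m hm j hocc hj => ?_⟩
      have := hocc.length_le
      rw [List.length_drop] at this
      omega
    have hst0 : cl.toList = PySem.Chars.rstrip (s.take s.length) := by
      rw [List.take_length, hrs]; exact hcl
    obtain ⟨c', hcut', hA, hB⟩ := pv_loop s hs pyMarkers (fun m hm => hm) s.length hcut0 cl hst0
    have hofl : String.ofList s = cl := by rw [← hcl, String.ofList_toList]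
    rw [hofl] at hB
    have hlen : PySem.Str.len cl = (s.length : Int) := by
      unfold PySem.Str.len; rw [hcl]
    show pyMarkers.foldl pyA_step cl =
      PySem.Str.strip (PySem.Str.slice cl none (some (pyMarkers.foldl (pyB_cut cl) (PySem.Str.len cl))))
    apply String.toList_inj.mp
    rw [hA, hlen, hB]
    have hslice : (PySem.Str.slice cl none (some (c' : Int))).toList = s.take c' := by
      unfold PySem.Str.slice
      rw [String.toList_ofList, PySem.Chars.slice_eq_listSlice, PySem.List.slice_to _ (by omega), hcl]
      simp
    unfold PySem.Str.strip
    rw [String.toList_ofList, hslice, pv_strip_of_lstripped _ (pv_dropWhile_take _ _ hs _)]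

-- ===== VERDICT (by name: the statement is the Claim_ definition above) =====
theorem sanitize_generated_reply_py_spec : Claim_equal_sanitize_generated_reply_py := by
  intro reply _
  unfold Spec_sanitize_generated_reply_py
  exact pv_main reply
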